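-- pv_equiv track=rewrite | github.com/25th-Night/coding-test | 프로그래머스/unrated/250136. ［PCCP 기출문제］ 2번 ／ 석유 시추/［PCCP 기출문제］ 2번 ／ 석유 시추.py | solution
-- ===== SOURCE A (Python) =====
-- from collections import deque, defaultdict
--
-- def bfs(maps, visited, r, c):
--     move = [(1, 0), (0, 1), (-1, 0), (0, -1)]
--     cnt = 1
--     max_c, min_c = c, c
--     q = deque([(r, c)])
--     visited[r][c] = True
--     while q:
--         cr, cc = q.popleft()
--         for r, c in move:
--             nr, nc = cr+r, cc+c
--             if nr in range(len(maps)) and nc in range(len(maps[0])) and not visited[nr][nc] and maps[nr][nc] == 1: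
--                 max_c, min_c = max(max_c, nc), min(min_c, nc)
--                 cnt += 1
--                 q.append((nr, nc))
--                 visited[nr][nc] = True
--
--     return cnt, max_c, min_c
--
-- def solution(land):
--     visited = [[False] * len(land[0]) for _ in range(len(land))]
--     dp = [0] * len(land[0])
--     for r in range(len(land)):
--         for c in range(len(land[0])):
--             if land[r][c] == 1 and not visited[r][c]:
--                 cnt, max_c, min_c = bfs(land, visited, r, c)
--                 for i in range(min_c, max_c+1):
--                     dp[i] += cnt
--     return max(dp)
-- ===== SOURCE B (Python) =====
-- def solution(land):
--     R, C = len(land), len(land[0])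
--     seen = set()
--     spans = []
--     for r in range(R):
--         for c in range(C):
--             if land[r][c] == 1 and (r, c) not in seen:
--                 seen.add((r, c))
--                 stack = [(r, c)]
--                 cells = []
--                 while stack:
--                     x, y = stack.pop()
--                     cells.append(y)
--                     for nx, ny in ((x - 1, y), (x, y - 1), (x + 1, y), (x, y + 1)):
--                         if 0 <= nx < R and 0 <= ny < C and land[nx][ny] == 1 and (nx, ny) not in seen:
--                             seen.add((nx, ny))
--                             stack.append((nx, ny))
--                 spans.append((len(cells), min(cells), max(cells)))
--     diff = [0] * (C + 1)
--     for cnt, lo, hi in spans: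
--         diff[lo] += cnt
--         diff[hi + 1] -= cnt
--     s = 0
--     dp2 = []
--     for i in range(C):
--         s += diff[i]
--         dp2.append(s)
--     return max(dp2)
-- ===== Notes on version B (the rewrite author's own statement) =====
-- stated objective: alternative
-- what changed: BFS deque with inline per-cell span/count tracking and a per-component dp range-add loop is replaced by stack-based DFS over a coordinate set, with each component's size and column span computed from the collected cells and accumulated into a difference array that one prefix-sum pass turns into dp.
-- outside the precondition, e.g. on solution([]): A raises IndexError, B raises IndexError
import Mathlib
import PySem

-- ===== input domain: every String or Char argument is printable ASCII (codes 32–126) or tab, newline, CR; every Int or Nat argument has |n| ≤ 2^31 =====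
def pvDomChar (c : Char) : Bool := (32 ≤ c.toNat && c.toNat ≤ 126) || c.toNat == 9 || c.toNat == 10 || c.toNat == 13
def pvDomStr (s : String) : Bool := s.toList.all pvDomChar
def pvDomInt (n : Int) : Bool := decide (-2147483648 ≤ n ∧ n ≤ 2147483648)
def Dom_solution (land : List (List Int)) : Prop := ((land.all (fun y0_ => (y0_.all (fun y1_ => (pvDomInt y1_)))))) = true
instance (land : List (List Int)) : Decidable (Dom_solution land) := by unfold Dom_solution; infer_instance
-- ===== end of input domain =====

-- B replaces A's BFS deque + inline span tracking + per-component dp range-add loop by a DFS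
-- stack over a coordinate set, per-component spans computed from the collected cells, and a
-- difference array turned into dp by one prefix-sum pass (objective: alternative).
-- Python's visited matrix / dp list / diff list are modeled by the set of True coordinates and
-- total functions on indices: every access is to a single in-range entry, so this is exact.

-- ===== PORT A =====
-- guarded access land[i][j]: in A every read is under 0 ≤ i < len(land) and (by Pre_) j < len(row)
def pvAt (land : List (List Int)) (i j : Int) : Int :=
  PySem.List.pyGetD (PySem.List.pyGetD land i []) j 0

def pvMove : List (Int × Int) := [(1, 0), (0, 1), (-1, 0), (0, -1)]

-- the body of A's inner 'for r, c in move' loop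
def bfsInner (land : List (List Int)) (cr cc : Int)
    (st : PySem.Set (Int × Int) × List (Int × Int) × Int × Int × Int) (m : Int × Int) :
    PySem.Set (Int × Int) × List (Int × Int) × Int × Int × Int :=
  if (0 ≤ cr + m.1 ∧ cr + m.1 < (land.length : Int) ∧ 0 ≤ cc + m.2 ∧ cc + m.2 < ((land.headD []).length : Int)) ∧
      (cr + m.1, cc + m.2) ∉ st.1 ∧ pvAt land (cr + m.1) (cc + m.2) = 1 then
    (PySem.Set.add st.1 (cr + m.1, cc + m.2), st.2.1 ++ [(cr + m.1, cc + m.2)], st.2.2.1 + 1,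
      max st.2.2.2.1 (cc + m.2), min st.2.2.2.2 (cc + m.2))
  else st

-- A's 'while q' loop; fuel R*C+1 always suffices: each iteration pops one cell and every
-- enqueue marks a distinct fresh cell (proved below, the fuel-exhaustion branch is dead)
def bfsLoop (land : List (List Int)) :
    Nat → PySem.Set (Int × Int) → List (Int × Int) → Int → Int → Int →
      PySem.Set (Int × Int) × Int × Int × Int
  | 0, vis, _, cnt, mx, mn => (vis, cnt, mx, mn)
  | _ + 1, vis, [], cnt, mx, mn => (vis, cnt, mx, mn)
  | fuel + 1, vis, (cr, cc) :: rest, cnt, mx, mn =>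
    let st := pvMove.foldl (bfsInner land cr cc) (vis, rest, cnt, mx, mn)
    bfsLoop land fuel st.1 st.2.1 st.2.2.1 st.2.2.2.1 st.2.2.2.2

def bfs (land : List (List Int)) (vis : PySem.Set (Int × Int)) (r c : Int) :
    PySem.Set (Int × Int) × Int × Int × Int :=
  bfsLoop land (land.length * (land.headD []).length + 1) (PySem.Set.add vis (r, c)) [(r, c)] 1 c c

def solution (land : List (List Int)) : Int :=
  let R : Int := land.length
  let C : Int := (land.headD []).length
  let st := (PySem.List.pyRange 0 R 1).foldl (fun st r =>
    (PySem.List.pyRange 0 C 1).foldl (fun (st : PySem.Set (Int × Int) × (Int → Int)) c =>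
      if pvAt land r c = 1 ∧ (r, c) ∉ st.1 then
        let res := bfs land st.1 r c
        (res.1,
          (PySem.List.pyRange res.2.2.2 (res.2.2.1 + 1) 1).foldl
            (fun d i => fun j => if j = i then d j + res.2.1 else d j) st.2)
      else st) st)
    (([] : PySem.Set (Int × Int)), (fun _ => 0 : Int → Int))
  (PySem.List.max? ((PySem.List.pyRange 0 C 1).map st.2) (fun x => x)).getD 0

-- ===== PORT B =====
-- B's guarded access land[nx][ny] (reads are under the same in-range guards as A's)
def pvAtB (land : List (List Int)) (i j : Int) : Int :=
  PySem.List.pyGetD (PySem.List.pyGetD land i []) j 0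

def pvNbrs (x y : Int) : List (Int × Int) := [(x - 1, y), (x, y - 1), (x + 1, y), (x, y + 1)]

-- the body of B's 'for nx, ny in …' loop (stack top modeled at the list head)
def dfsInner (land : List (List Int))
    (st : PySem.Set (Int × Int) × List (Int × Int)) (p : Int × Int) :
    PySem.Set (Int × Int) × List (Int × Int) :=
  if (0 ≤ p.1 ∧ p.1 < (land.length : Int)) ∧ (0 ≤ p.2 ∧ p.2 < ((land.headD []).length : Int)) ∧
      pvAtB land p.1 p.2 = 1 ∧ p ∉ st.1 then
    (PySem.Set.add st.1 p, p :: st.2)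
  else st

-- B's 'while stack' loop; same dead fuel bound as A's
def dfsLoop (land : List (List Int)) :
    Nat → PySem.Set (Int × Int) → List (Int × Int) → List Int →
      PySem.Set (Int × Int) × List Int
  | 0, seen, _, cells => (seen, cells)
  | _ + 1, seen, [], cells => (seen, cells)
  | fuel + 1, seen, (x, y) :: rest, cells =>
    let st := (pvNbrs x y).foldl (dfsInner land) (seen, rest)
    dfsLoop land fuel st.1 st.2 (cells ++ [y])

-- the body of B's 'for cnt, lo, hi in spans' loop: diff[lo] += cnt; diff[hi+1] -= cnt
def diffStep (d : Int → Int) (sp : Int × Int × Int) : Int → Int :=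
  let d1 : Int → Int := fun j => if j = sp.2.1 then d j + sp.1 else d j
  fun j => if j = sp.2.2 + 1 then d1 j - sp.1 else d1 j

def solution_alt (land : List (List Int)) : Int :=
  let R : Int := land.length
  let C : Int := (land.headD []).length
  let st := (PySem.List.pyRange 0 R 1).foldl (fun st r =>
    (PySem.List.pyRange 0 C 1).foldl (fun (st : PySem.Set (Int × Int) × List (Int × Int × Int)) c =>
      if pvAtB land r c = 1 ∧ (r, c) ∉ st.1 then
        let res := dfsLoop land (land.length * (land.headD []).length + 1)
          (PySem.Set.add st.1 (r, c)) [(r, c)] []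
        (res.1, st.2 ++ [((res.2.length : Int),
          (PySem.List.min? res.2 (fun v => v)).getD 0,
          (PySem.List.max? res.2 (fun v => v)).getD 0)])
      else st) st)
    (([] : PySem.Set (Int × Int)), ([] : List (Int × Int × Int)))
  let diff := st.2.foldl diffStep (fun _ => (0 : Int))
  let dp2 := ((PySem.List.pyRange 0 C 1).foldl
    (fun (acc : Int × List Int) i => (acc.1 + diff i, acc.2 ++ [acc.1 + diff i])) (0, [])).2
  (PySem.List.max? dp2 (fun x => x)).getD 0

-- ===== PRECONDITION & SPEC =====
-- Pre_ excludes exactly the inputs where the Python A raises: empty land / empty first row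
-- (IndexError on land[0] / ValueError on max([])) and a row shorter than the first row
-- (IndexError on land[r][c], reached for every r,c < len(land[0])).
def Pre_solution (land : List (List Int)) : Prop :=
  land ≠ [] ∧ 0 < (land.headD []).length ∧ ∀ row ∈ land, (land.headD []).length ≤ row.length
instance (land : List (List Int)) : Decidable (Pre_solution land) := by
  unfold Pre_solution; infer_instance

def pvWitness_solution : List (List Int) := [[1, 0], [1, 1]]

def Spec_solution (land : List (List Int)) (out : Int) : Prop := out = solution_alt land
instance (land : List (List Int)) (out : Int) : Decidable (Spec_solution land out) := by
  unfold Spec_solution; infer_instance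

-- ===== CLAIM (what is proved, stated in full; the proofs are below) =====
def Claim_equal_solution : Prop :=
  ∀ (land : List (List Int)), Dom_solution land → Pre_solution land →
    Spec_solution land (solution land)


-- ===== LEMMAS AND PROOFS =====
set_option maxHeartbeats 1600000

-- ---- abstract grid / reachability layer ----
lemma pvAtB_eq (land : List (List Int)) (i j : Int) : pvAtB land i j = pvAt land i j := rfl

def InGrid (land : List (List Int)) (p : Int × Int) : Prop :=
  0 ≤ p.1 ∧ p.1 < (land.length : Int) ∧ 0 ≤ p.2 ∧ p.2 < ((land.headD []).length : Int)

def pvOil (land : List (List Int)) (p : Int × Int) : Prop :=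
  InGrid land p ∧ pvAt land p.1 p.2 = 1

def pvAdj (u p : Int × Int) : Prop := p ∈ pvNbrs u.1 u.2

def targetsA (u : Int × Int) : List (Int × Int) :=
  pvMove.map (fun m => (u.1 + m.1, u.2 + m.2))

lemma mem_targetsA {u p : Int × Int} : p ∈ targetsA u ↔ pvAdj u p := by
  obtain ⟨a, b⟩ := u
  obtain ⟨x, y⟩ := p
  simp [targetsA, pvMove, pvAdj, pvNbrs, Prod.ext_iff]
  omega

lemma nodup_targetsA (u : Int × Int) : (targetsA u).Nodup := by
  obtain ⟨a, b⟩ := u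
  simp [targetsA, pvMove, List.nodup_cons, Prod.ext_iff]
  try omega

lemma nodup_pvNbrs (x y : Int) : (pvNbrs x y).Nodup := by
  simp [pvNbrs, List.nodup_cons, Prod.ext_iff]
  try omega

inductive pvRch (land : List (List Int)) (V Q : Set (Int × Int)) : (Int × Int) → Prop
  | base {p : Int × Int} (h : p ∈ Q) : pvRch land V Q p
  | step {p q : Int × Int} (h : pvRch land V Q p) (ha : pvAdj p q) (ho : pvOil land q)
      (hv : q ∉ V) : pvRch land V Q q

def pvNews (land : List (List Int)) (V : Set (Int × Int)) (u : Int × Int) : Set (Int × Int) :=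
  {p | pvAdj u p ∧ pvOil land p ∧ p ∉ V}

lemma rch_empty {land : List (List Int)} {V : Set (Int × Int)} {w : Int × Int}
    (h : pvRch land V ∅ w) : False := by
  induction h with
  | base h => exact h
  | step _ _ _ _ ih => exact ih

lemma rch_pop_fwd {land : List (List Int)} {V Rq : Set (Int × Int)} {u w : Int × Int}
    (hu : u ∈ V) (h : pvRch land V ({u} ∪ Rq) w) :
    (w ∈ V → w = u ∨ w ∈ Rq) ∧
      (w ∈ V ∪ pvNews land V u ∨
        pvRch land (V ∪ pvNews land V u) (Rq ∪ pvNews land V u) w) := by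
  induction h with
  | @base p h =>
    rcases h with h | h
    · exact ⟨fun _ => Or.inl h, Or.inl (Or.inl (h ▸ hu))⟩
    · exact ⟨fun _ => Or.inr h, Or.inr (pvRch.base (Or.inl h))⟩
  | @step p q hp ha ho hv ih =>
    refine ⟨fun hqV => absurd hqV hv, ?_⟩
    by_cases hqN : q ∈ pvNews land V u
    · exact Or.inl (Or.inr hqN)
    · have hq' : q ∉ V ∪ pvNews land V u := by
        intro hq
        rcases hq with hq | hq
        · exact hv hq
        · exact hqN hq
      rcases ih.2 with hp' | hp'
      · rcases hp' with hpV | hpN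
        · rcases ih.1 hpV with rfl | hpR
          · exact absurd ⟨ha, ho, hv⟩ hqN
          · exact Or.inr (pvRch.step (pvRch.base (Or.inl hpR)) ha ho hq')
        · exact Or.inr (pvRch.step (pvRch.base (Or.inr hpN)) ha ho hq')
      · exact Or.inr (pvRch.step hp' ha ho hq')

lemma rch_pop_bwd {land : List (List Int)} {V Rq : Set (Int × Int)} {u w : Int × Int}
    (_hu : u ∈ V) (h : pvRch land (V ∪ pvNews land V u) (Rq ∪ pvNews land V u) w) :
    w ∈ V ∨ pvRch land V ({u} ∪ Rq) w := by
  induction h with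
  | @base p h =>
    rcases h with h | h
    · exact Or.inr (pvRch.base (Or.inr h))
    · exact Or.inr (pvRch.step (pvRch.base (Or.inl rfl)) h.1 h.2.1 h.2.2)
  | @step p q hp ha ho hv ih =>
    have hqV : q ∉ V := fun hq => hv (Or.inl hq)
    rcases ih with hpV | hpR
    · -- p ∈ V: p was a base of the derivation, recover it through News or Rq
      -- we re-run the analysis: either p = u or p is reachable anyway
      rcases hp with h | ⟨hp', ha', ho', hv'⟩
      · rcases h with h | h
        · exact Or.inr (pvRch.step (pvRch.base (Or.inr h)) ha ho hqV)
        · exact Or.inr (pvRch.step (pvRch.step (pvRch.base (Or.inl rfl)) h.1 h.2.1 h.2.2) ha ho hqV)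
      · exact absurd (Or.inl hpV) hv'
    · exact Or.inr (pvRch.step hpR ha ho hqV)

lemma rch_pop {land : List (List Int)} {V Rq : Set (Int × Int)} {u : Int × Int}
    (hu : u ∈ V) (w : Int × Int) :
    (w ∈ V ∨ pvRch land V ({u} ∪ Rq) w) ↔
      (w ∈ V ∪ pvNews land V u ∨
        pvRch land (V ∪ pvNews land V u) (Rq ∪ pvNews land V u) w) := by
  constructor
  · rintro (h | h)
    · exact Or.inl (Or.inl h)
    · exact (rch_pop_fwd hu h).2
  · rintro (h | h)
    · rcases h with h | h
      · exact Or.inl h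
      · exact Or.inr (pvRch.step (pvRch.base (Or.inl rfl)) h.1 h.2.1 h.2.2)
    · exact rch_pop_bwd hu h

-- ---- batch form of the two inner neighbour loops ----
def newsOf (land : List (List Int)) (vis : List (Int × Int)) (tgts : List (Int × Int)) :
    List (Int × Int) :=
  tgts.filter (fun p => decide ((0 ≤ p.1 ∧ p.1 < (land.length : Int) ∧ 0 ≤ p.2 ∧
    p.2 < ((land.headD []).length : Int)) ∧ p ∉ vis ∧ pvAt land p.1 p.2 = 1))

lemma mem_newsOf {land : List (List Int)} {vis tgts : List (Int × Int)} {p : Int × Int} :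
    p ∈ newsOf land vis tgts ↔ p ∈ tgts ∧ pvOil land p ∧ p ∉ vis := by
  simp [newsOf, List.mem_filter, pvOil, InGrid]
  tauto

lemma nodup_newsOf {land : List (List Int)} {vis tgts : List (Int × Int)}
    (h : tgts.Nodup) : (newsOf land vis tgts).Nodup := h.filter _

lemma newsOf_congr {land : List (List Int)} {vis vis' tgts : List (Int × Int)}
    (h : ∀ p ∈ tgts, p ∈ vis' ↔ p ∈ vis) :
    newsOf land vis' tgts = newsOf land vis tgts := by
  apply List.filter_congr
  intro p hp
  have := h p hp
  simp only [decide_eq_decide]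
  tauto

def stepA (land : List (List Int))
    (st : PySem.Set (Int × Int) × List (Int × Int) × Int × Int × Int) (p : Int × Int) :
    PySem.Set (Int × Int) × List (Int × Int) × Int × Int × Int :=
  if (0 ≤ p.1 ∧ p.1 < (land.length : Int) ∧ 0 ≤ p.2 ∧ p.2 < ((land.headD []).length : Int)) ∧
      p ∉ st.1 ∧ pvAt land p.1 p.2 = 1 then
    (PySem.Set.add st.1 p, st.2.1 ++ [p], st.2.2.1 + 1, max st.2.2.2.1 p.2, min st.2.2.2.2 p.2)
  else st

lemma fold_bfsInner (land : List (List Int)) (cr cc : Int)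
    (st : PySem.Set (Int × Int) × List (Int × Int) × Int × Int × Int) :
    pvMove.foldl (bfsInner land cr cc) st = (targetsA (cr, cc)).foldl (stepA land) st := by
  rw [targetsA, List.foldl_map]
  rfl

lemma batchA (land : List (List Int)) :
    ∀ (tgts : List (Int × Int)), tgts.Nodup →
      ∀ (vis : PySem.Set (Int × Int)) (q : List (Int × Int)) (cnt mx mn : Int),
      tgts.foldl (stepA land) (vis, q, cnt, mx, mn) =
        (vis ++ newsOf land vis tgts, q ++ newsOf land vis tgts,
         cnt + (newsOf land vis tgts).length,
         ((newsOf land vis tgts).map Prod.snd).foldl max mx,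
         ((newsOf land vis tgts).map Prod.snd).foldl min mn) := by
  intro tgts
  induction tgts with
  | nil => intro _ vis q cnt mx mn; simp [newsOf]
  | cons t ts ih =>
    intro hnd vis q cnt mx mn
    have htts : t ∉ ts := (List.nodup_cons.mp hnd).1
    have hnd' : ts.Nodup := (List.nodup_cons.mp hnd).2
    by_cases hg : (0 ≤ t.1 ∧ t.1 < (land.length : Int) ∧ 0 ≤ t.2 ∧
        t.2 < ((land.headD []).length : Int)) ∧ t ∉ vis ∧ pvAt land t.1 t.2 = 1
    · have hstep : stepA land (vis, q, cnt, mx, mn) t =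
          (vis ++ [t], q ++ [t], cnt + 1, max mx t.2, min mn t.2) := by
        simp only [stepA, if_pos hg]
        rw [PySem.Set.add_of_not_mem hg.2.1]
      have hnews : newsOf land (vis ++ [t]) ts = newsOf land vis ts := by
        apply newsOf_congr
        intro p hp
        have hne : p ≠ t := fun e => htts (e ▸ hp)
        simp [List.mem_append, hne]
      have hcons : newsOf land vis (t :: ts) = t :: newsOf land vis ts := by
        unfold newsOf
        rw [List.filter_cons, if_pos (by simp only [decide_eq_true_eq]; exact hg)]
      rw [List.foldl_cons, hstep, ih hnd' (vis ++ [t]) (q ++ [t]) (cnt + 1) (max mx t.2) (min mn t.2), hcons, hnews]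
      simp only [Prod.mk.injEq, List.map_cons, List.foldl_cons, List.length_cons,
        List.append_assoc, List.singleton_append, Nat.cast_add, Nat.cast_one]
      exact ⟨trivial, trivial, by omega, trivial⟩
    · have hstep : stepA land (vis, q, cnt, mx, mn) t = (vis, q, cnt, mx, mn) := by
        simp only [stepA, if_neg hg]
      have hcons : newsOf land vis (t :: ts) = newsOf land vis ts := by
        unfold newsOf
        rw [List.filter_cons, if_neg (by simp only [decide_eq_true_eq]; exact hg)]
      rw [List.foldl_cons, hstep, ih hnd' vis q cnt mx mn, hcons]

lemma batchB (land : List (List Int)) :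
    ∀ (tgts : List (Int × Int)), tgts.Nodup →
      ∀ (seen : PySem.Set (Int × Int)) (stack : List (Int × Int)),
      tgts.foldl (dfsInner land) (seen, stack) =
        (seen ++ newsOf land seen tgts, (newsOf land seen tgts).reverse ++ stack) := by
  intro tgts
  induction tgts with
  | nil => intro _ seen stack; simp [newsOf]
  | cons t ts ih =>
    intro hnd seen stack
    have htts : t ∉ ts := (List.nodup_cons.mp hnd).1
    have hnd' : ts.Nodup := (List.nodup_cons.mp hnd).2
    by_cases hg : (0 ≤ t.1 ∧ t.1 < (land.length : Int) ∧ 0 ≤ t.2 ∧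
        t.2 < ((land.headD []).length : Int)) ∧ t ∉ seen ∧ pvAt land t.1 t.2 = 1
    · have hstep : dfsInner land (seen, stack) t = (seen ++ [t], t :: stack) := by
        simp only [dfsInner, pvAtB_eq]
        rw [if_pos (by tauto)]
        rw [PySem.Set.add_of_not_mem hg.2.1]
      have hnews : newsOf land (seen ++ [t]) ts = newsOf land seen ts := by
        apply newsOf_congr
        intro p hp
        have hne : p ≠ t := fun e => htts (e ▸ hp)
        simp [List.mem_append, hne]
      have hcons : newsOf land seen (t :: ts) = t :: newsOf land seen ts := by
        unfold newsOf
        rw [List.filter_cons, if_pos (by simp only [decide_eq_true_eq]; exact hg)]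
      rw [List.foldl_cons, hstep, ih hnd' (seen ++ [t]) (t :: stack), hcons, hnews]
      simp only [List.reverse_cons, List.append_assoc, List.singleton_append]
    · have hstep : dfsInner land (seen, stack) t = (seen, stack) := by
        simp only [dfsInner, pvAtB_eq]
        rw [if_neg (by tauto)]
      have hcons : newsOf land seen (t :: ts) = newsOf land seen ts := by
        unfold newsOf
        rw [List.filter_cons, if_neg (by simp only [decide_eq_true_eq]; exact hg)]
      rw [List.foldl_cons, hstep, ih hnd' seen stack, hcons]

-- ---- counting unvisited grid cells (the fuel measure) ----
def gridL (land : List (List Int)) : List (Int × Int) :=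
  PySem.List.pyRange 0 (land.length : Int) 1 ×ˢ
    PySem.List.pyRange 0 ((land.headD []).length : Int) 1

lemma mem_gridL {land : List (List Int)} {p : Int × Int} : p ∈ gridL land ↔ InGrid land p := by
  cases p with
  | mk a b =>
    simp [gridL, PySem.List.mem_pyRange_one, InGrid]
    tauto

lemma nodup_gridL (land : List (List Int)) : (gridL land).Nodup := by
  exact (PySem.List.nodup_pyRange_one _ _).product (PySem.List.nodup_pyRange_one _ _)

def pvUnvis (land : List (List Int)) (vis : List (Int × Int)) : Nat :=
  ((gridL land).filter (fun p => decide (p ∉ vis))).length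

lemma pvUnvis_append {land : List (List Int)} {vis news : List (Int × Int)}
    (hnd : news.Nodup) (hin : ∀ p ∈ news, InGrid land p ∧ p ∉ vis) :
    pvUnvis land (vis ++ news) + news.length = pvUnvis land vis := by
  unfold pvUnvis
  have h1 : (gridL land).filter (fun p => decide (p ∉ vis ++ news)) =
      ((gridL land).filter (fun p => decide (p ∉ vis))).filter (fun p => decide (p ∉ news)) := by
    rw [List.filter_filter]
    apply List.filter_congr
    intro p _
    simp [List.mem_append, not_or, Bool.and_comm]
  have h2 : ((gridL land).filter (fun p => decide (p ∉ vis))).length =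
      (((gridL land).filter (fun p => decide (p ∉ vis))).filter (fun p => decide (p ∈ news))).length +
      (((gridL land).filter (fun p => decide (p ∉ vis))).filter (fun p => decide (p ∉ news))).length := by
    rw [List.length_eq_length_filter_add (fun p => decide (p ∈ news))]
    congr 1
    apply congrArg
    apply List.filter_congr
    intro p _
    simp
  have h3 : (((gridL land).filter (fun p => decide (p ∉ vis))).filter (fun p => decide (p ∈ news))).length
      = news.length := by
    apply List.Perm.length_eq
    apply (List.perm_ext_iff_of_nodup (((nodup_gridL land).filter _).filter _) hnd).mpr
    intro p
    simp only [List.mem_filter, decide_eq_true_eq]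
    constructor
    · rintro ⟨_, hp⟩
      exact hp
    · intro hp
      exact ⟨⟨mem_gridL.mpr (hin p hp).1, by simpa using (hin p hp).2⟩, hp⟩
  rw [h1]
  omega

lemma pvUnvis_le (land : List (List Int)) (vis : List (Int × Int)) :
    pvUnvis land vis ≤ land.length * (land.headD []).length := by
  unfold pvUnvis
  calc ((gridL land).filter (fun p => decide (p ∉ vis))).length
      ≤ (gridL land).length := List.length_filter_le _ _
    _ = land.length * (land.headD []).length := by
        simp [gridL, List.length_product, PySem.List.length_pyRange_one]

-- ---- the two flood loops compute the reachable set ----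
lemma bfsLoop_succ (land : List (List Int)) (fuel : Nat) (vis : PySem.Set (Int × Int))
    (cr cc : Int) (rest : List (Int × Int)) (cnt mx mn : Int) :
    bfsLoop land (fuel + 1) vis ((cr, cc) :: rest) cnt mx mn =
      bfsLoop land fuel (pvMove.foldl (bfsInner land cr cc) (vis, rest, cnt, mx, mn)).1
        (pvMove.foldl (bfsInner land cr cc) (vis, rest, cnt, mx, mn)).2.1
        (pvMove.foldl (bfsInner land cr cc) (vis, rest, cnt, mx, mn)).2.2.1
        (pvMove.foldl (bfsInner land cr cc) (vis, rest, cnt, mx, mn)).2.2.2.1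
        (pvMove.foldl (bfsInner land cr cc) (vis, rest, cnt, mx, mn)).2.2.2.2 := rfl

lemma dfsLoop_succ (land : List (List Int)) (fuel : Nat) (seen : PySem.Set (Int × Int))
    (x y : Int) (rest : List (Int × Int)) (cells : List Int) :
    dfsLoop land (fuel + 1) seen ((x, y) :: rest) cells =
      dfsLoop land fuel ((pvNbrs x y).foldl (dfsInner land) (seen, rest)).1
        ((pvNbrs x y).foldl (dfsInner land) (seen, rest)).2 (cells ++ [y]) := rfl

lemma bfsLoop_spec (land : List (List Int)) :
    ∀ (fuel : Nat) (vis : PySem.Set (Int × Int)) (q : List (Int × Int)) (cnt mx mn : Int),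
      (∀ p ∈ q, p ∈ vis) →
      pvUnvis land vis + q.length ≤ fuel →
      ∃ new : List (Int × Int),
        new.Nodup ∧ (∀ p ∈ new, p ∉ vis ∧ pvOil land p) ∧
        (∀ w, (w ∈ vis ∨ w ∈ new) ↔
          (w ∈ vis ∨ pvRch land {p | p ∈ vis} {p | p ∈ q} w)) ∧
        bfsLoop land fuel vis q cnt mx mn =
          (vis ++ new, cnt + new.length,
           (new.map Prod.snd).foldl max mx, (new.map Prod.snd).foldl min mn) := by
  have hQnil : ∀ (vis : PySem.Set (Int × Int)) (w : Int × Int),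
      (w ∈ vis ∨ w ∈ ([] : List (Int × Int))) ↔
        (w ∈ vis ∨ pvRch land {p | p ∈ vis} {p | p ∈ ([] : List (Int × Int))} w) := by
    intro vis w
    have hemp : {p : Int × Int | p ∈ ([] : List (Int × Int))} = (∅ : Set (Int × Int)) := by
      ext p; simp
    constructor
    · rintro (h | h)
      · exact Or.inl h
      · simp at h
    · rintro (h | h)
      · exact Or.inl h
      · rw [hemp] at h
        exact (rch_empty h).elim
  have hnil : ∀ (fuel : Nat) (vis : PySem.Set (Int × Int)) (cnt mx mn : Int),
      bfsLoop land fuel vis [] cnt mx mn =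
        (vis ++ [], cnt + (([] : List (Int × Int)).length : Int),
         (([] : List (Int × Int)).map Prod.snd).foldl max mx,
         (([] : List (Int × Int)).map Prod.snd).foldl min mn) := by
    intro fuel vis cnt mx mn
    cases fuel with
    | zero => simp [show bfsLoop land 0 vis [] cnt mx mn = (vis, cnt, mx, mn) from rfl]
    | succ f => simp [show bfsLoop land (f + 1) vis [] cnt mx mn = (vis, cnt, mx, mn) from rfl]
  intro fuel
  induction fuel with
  | zero =>
    intro vis q cnt mx mn hqv hf
    have hq : q = [] := by
      cases q with
      | nil => rfl
      | cons a l => simp at hf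
    subst hq
    exact ⟨[], by simp, by simp, hQnil vis, hnil 0 vis cnt mx mn⟩
  | succ fuel ih =>
    intro vis q cnt mx mn hqv hf
    cases q with
    | nil => exact ⟨[], by simp, by simp, hQnil vis, hnil (fuel + 1) vis cnt mx mn⟩
    | cons u rest =>
      obtain ⟨cr, cc⟩ := u
      have hbatch := batchA land (targetsA (cr, cc)) (nodup_targetsA _) vis rest cnt mx mn
      have hmemnews : ∀ p, p ∈ newsOf land vis (targetsA (cr, cc)) ↔
          pvAdj (cr, cc) p ∧ pvOil land p ∧ p ∉ vis := by
        intro p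
        rw [mem_newsOf]
        constructor
        · rintro ⟨h1, h2, h3⟩; exact ⟨mem_targetsA.mp h1, h2, h3⟩
        · rintro ⟨h1, h2, h3⟩; exact ⟨mem_targetsA.mpr h1, h2, h3⟩
      set news := newsOf land vis (targetsA (cr, cc)) with hnewsdef
      have hnodupnews : news.Nodup := nodup_newsOf (nodup_targetsA _)
      have hqv' : ∀ p ∈ rest ++ news, p ∈ vis ++ news := by
        intro p hp
        rcases List.mem_append.mp hp with h | h
        · exact List.mem_append.mpr (Or.inl (hqv p (List.mem_cons_of_mem _ h)))
        · exact List.mem_append.mpr (Or.inr h)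
      have hunv : pvUnvis land (vis ++ news) + news.length = pvUnvis land vis :=
        pvUnvis_append hnodupnews
          (fun p hp => ⟨((hmemnews p).mp hp).2.1.1, ((hmemnews p).mp hp).2.2⟩)
      have hf' : pvUnvis land (vis ++ news) + (rest ++ news).length ≤ fuel := by
        simp only [List.length_append] at hf ⊢
        simp only [List.length_cons] at hf
        omega
      obtain ⟨new₂, hnd₂, hprops₂, hiff₂, heq₂⟩ :=
        ih (vis ++ news) (rest ++ news) (cnt + news.length)
          ((news.map Prod.snd).foldl max mx) ((news.map Prod.snd).foldl min mn) hqv' hf'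
      have hu : (cr, cc) ∈ vis := hqv _ List.mem_cons_self
      refine ⟨news ++ new₂, ?_, ?_, ?_, ?_⟩
      · refine hnodupnews.append hnd₂ ?_
        intro a ha hb
        exact (hprops₂ a hb).1 (List.mem_append.mpr (Or.inr ha))
      · intro p hp
        rcases List.mem_append.mp hp with h | h
        · exact ⟨((hmemnews p).mp h).2.2, ((hmemnews p).mp h).2.1⟩
        · exact ⟨fun hv => (hprops₂ p h).1 (List.mem_append.mpr (Or.inl hv)), (hprops₂ p h).2⟩
      · intro w
        have hpop := rch_pop (land := land) (Rq := {p | p ∈ rest}) (u := (cr, cc))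
          (V := {p | p ∈ vis}) hu w
        have hSV : ({p | p ∈ vis} : Set (Int × Int)) ∪ pvNews land {p | p ∈ vis} (cr, cc) =
            {p | p ∈ vis ++ news} := by
          ext p
          simp only [Set.mem_union, Set.mem_setOf_eq, List.mem_append, pvNews, hmemnews p]
        have hSQ : ({p | p ∈ rest} : Set (Int × Int)) ∪ pvNews land {p | p ∈ vis} (cr, cc) =
            {p | p ∈ rest ++ news} := by
          ext p
          simp only [Set.mem_union, Set.mem_setOf_eq, List.mem_append, pvNews, hmemnews p]
        have hSQ0 : ({(cr, cc)} : Set (Int × Int)) ∪ {p | p ∈ rest} =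
            {p | p ∈ (cr, cc) :: rest} := by
          ext p
          simp [List.mem_cons]
        rw [hSV, hSQ, hSQ0] at hpop
        have h2 := hiff₂ w
        simp only [List.mem_append, Set.mem_setOf_eq] at hpop h2 ⊢
        tauto
      · have hstep : bfsLoop land (fuel + 1) vis ((cr, cc) :: rest) cnt mx mn =
            bfsLoop land fuel (vis ++ news) (rest ++ news) (cnt + news.length)
              ((news.map Prod.snd).foldl max mx) ((news.map Prod.snd).foldl min mn) := by
          rw [bfsLoop_succ, fold_bfsInner, hbatch]
        rw [hstep, heq₂]
        simp only [List.append_assoc, List.map_append, List.foldl_append, List.length_append]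
        refine congrArg _ ?_
        simp only [Prod.mk.injEq]
        exact ⟨by push_cast; ring, trivial⟩

lemma dfsLoop_spec (land : List (List Int)) :
    ∀ (fuel : Nat) (seen : PySem.Set (Int × Int)) (stack : List (Int × Int)) (cells : List Int),
      (∀ p ∈ stack, p ∈ seen) →
      pvUnvis land seen + stack.length ≤ fuel →
      ∃ new : List (Int × Int), ∃ cells' : List Int,
        new.Nodup ∧ (∀ p ∈ new, p ∉ seen ∧ pvOil land p) ∧
        (∀ w, (w ∈ seen ∨ w ∈ new) ↔
          (w ∈ seen ∨ pvRch land {p | p ∈ seen} {p | p ∈ stack} w)) ∧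
        dfsLoop land fuel seen stack cells = (seen ++ new, cells') ∧
        List.Perm cells' (cells ++ stack.map Prod.snd ++ new.map Prod.snd) := by
  have hQnil : ∀ (seen : PySem.Set (Int × Int)) (w : Int × Int),
      (w ∈ seen ∨ w ∈ ([] : List (Int × Int))) ↔
        (w ∈ seen ∨ pvRch land {p | p ∈ seen} {p | p ∈ ([] : List (Int × Int))} w) := by
    intro seen w
    have hemp : {p : Int × Int | p ∈ ([] : List (Int × Int))} = (∅ : Set (Int × Int)) := by
      ext p; simp
    constructor
    · rintro (h | h)
      · exact Or.inl h
      · simp at h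
    · rintro (h | h)
      · exact Or.inl h
      · rw [hemp] at h
        exact (rch_empty h).elim
  have hnil : ∀ (fuel : Nat) (seen : PySem.Set (Int × Int)) (cells : List Int),
      dfsLoop land fuel seen [] cells = (seen ++ [], cells) := by
    intro fuel seen cells
    cases fuel with
    | zero => simp [show dfsLoop land 0 seen [] cells = (seen, cells) from rfl]
    | succ f => simp [show dfsLoop land (f + 1) seen [] cells = (seen, cells) from rfl]
  intro fuel
  induction fuel with
  | zero =>
    intro seen stack cells hqv hf
    have hq : stack = [] := by
      cases stack with
      | nil => rfl
      | cons a l => simp at hf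
    subst hq
    exact ⟨[], cells, by simp, by simp, hQnil seen, hnil 0 seen cells, by simp⟩
  | succ fuel ih =>
    intro seen stack cells hqv hf
    cases stack with
    | nil => exact ⟨[], cells, by simp, by simp, hQnil seen, hnil (fuel + 1) seen cells, by simp⟩
    | cons u rest =>
      obtain ⟨x, y⟩ := u
      have hbatch := batchB land (pvNbrs x y) (nodup_pvNbrs x y) seen rest
      have hmemnews : ∀ p, p ∈ newsOf land seen (pvNbrs x y) ↔
          pvAdj (x, y) p ∧ pvOil land p ∧ p ∉ seen := by
        intro p
        rw [mem_newsOf]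
        exact Iff.rfl
      set news := newsOf land seen (pvNbrs x y) with hnewsdef
      have hnodupnews : news.Nodup := nodup_newsOf (nodup_pvNbrs x y)
      have hqv' : ∀ p ∈ news.reverse ++ rest, p ∈ seen ++ news := by
        intro p hp
        rcases List.mem_append.mp hp with h | h
        · exact List.mem_append.mpr (Or.inr (List.mem_reverse.mp h))
        · exact List.mem_append.mpr (Or.inl (hqv p (List.mem_cons_of_mem _ h)))
      have hunv : pvUnvis land (seen ++ news) + news.length = pvUnvis land seen :=
        pvUnvis_append hnodupnews
          (fun p hp => ⟨((hmemnews p).mp hp).2.1.1, ((hmemnews p).mp hp).2.2⟩)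
      have hf' : pvUnvis land (seen ++ news) + (news.reverse ++ rest).length ≤ fuel := by
        simp only [List.length_append, List.length_reverse] at hf ⊢
        simp only [List.length_cons] at hf
        omega
      obtain ⟨new₂, cells₂, hnd₂, hprops₂, hiff₂, heq₂, hperm₂⟩ :=
        ih (seen ++ news) (news.reverse ++ rest) (cells ++ [y]) hqv' hf'
      have hu : (x, y) ∈ seen := hqv _ List.mem_cons_self
      refine ⟨news ++ new₂, cells₂, ?_, ?_, ?_, ?_, ?_⟩
      · refine hnodupnews.append hnd₂ ?_
        intro a ha hb
        exact (hprops₂ a hb).1 (List.mem_append.mpr (Or.inr ha))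
      · intro p hp
        rcases List.mem_append.mp hp with h | h
        · exact ⟨((hmemnews p).mp h).2.2, ((hmemnews p).mp h).2.1⟩
        · exact ⟨fun hv => (hprops₂ p h).1 (List.mem_append.mpr (Or.inl hv)), (hprops₂ p h).2⟩
      · intro w
        have hpop := rch_pop (land := land) (Rq := {p | p ∈ rest}) (u := (x, y))
          (V := {p | p ∈ seen}) hu w
        have hSV : ({p | p ∈ seen} : Set (Int × Int)) ∪ pvNews land {p | p ∈ seen} (x, y) =
            {p | p ∈ seen ++ news} := by
          ext p
          simp only [Set.mem_union, Set.mem_setOf_eq, List.mem_append, pvNews, hmemnews p]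
        have hSQ : ({p | p ∈ rest} : Set (Int × Int)) ∪ pvNews land {p | p ∈ seen} (x, y) =
            {p | p ∈ news.reverse ++ rest} := by
          ext p
          simp only [Set.mem_union, Set.mem_setOf_eq, List.mem_append, List.mem_reverse,
            pvNews, hmemnews p]
          tauto
        have hSQ0 : ({(x, y)} : Set (Int × Int)) ∪ {p | p ∈ rest} =
            {p | p ∈ (x, y) :: rest} := by
          ext p
          simp [List.mem_cons]
        rw [hSV, hSQ, hSQ0] at hpop
        have h2 := hiff₂ w
        simp only [List.mem_append, Set.mem_setOf_eq] at hpop h2 ⊢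
        tauto
      · have hstep : dfsLoop land (fuel + 1) seen ((x, y) :: rest) cells =
            dfsLoop land fuel (seen ++ news) (news.reverse ++ rest) (cells ++ [y]) := by
          rw [dfsLoop_succ, hbatch]
        rw [hstep, heq₂, List.append_assoc]
      · refine hperm₂.trans ?_
        simp only [List.map_append, List.map_reverse, List.map_cons]
        rw [← Multiset.coe_eq_coe]
        simp
        refine List.Perm.append_left cells (List.Perm.cons y ?_)
        exact (((news.map Prod.snd).reverse_perm).append_right _).trans
          (List.perm_append_comm_assoc (news.map Prod.snd) (rest.map Prod.snd) (new₂.map Prod.snd))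



-- ---- clean interfaces for the two flood calls ----
lemma bfs_spec (land : List (List Int)) (vis : PySem.Set (Int × Int)) (r c : Int)
    (hv : (r, c) ∉ vis) :
    ∃ new : List (Int × Int),
      new.Nodup ∧ (∀ p ∈ new, p ∉ vis ++ [(r, c)] ∧ pvOil land p) ∧
      (∀ w, (w ∈ vis ++ [(r, c)] ∨ w ∈ new) ↔
        (w ∈ vis ++ [(r, c)] ∨
          pvRch land {p | p ∈ vis ++ [(r, c)]} {p | p ∈ [(r, c)]} w)) ∧
      bfs land vis r c = (vis ++ [(r, c)] ++ new, 1 + (new.length : Int),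
        (new.map Prod.snd).foldl max c, (new.map Prod.snd).foldl min c) := by
  have hadd : PySem.Set.add vis (r, c) = vis ++ [(r, c)] := PySem.Set.add_of_not_mem hv
  have hq : ∀ p ∈ [(r, c)], p ∈ vis ++ [(r, c)] := by simp
  have hfuel : pvUnvis land (vis ++ [(r, c)]) + [(r, c)].length ≤
      land.length * (land.headD []).length + 1 := by
    have := pvUnvis_le land (vis ++ [(r, c)])
    simp only [List.length_singleton]
    omega
  obtain ⟨new, h1, h2, h3, h4⟩ :=
    bfsLoop_spec land (land.length * (land.headD []).length + 1) (vis ++ [(r, c)])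
      [(r, c)] 1 c c hq hfuel
  refine ⟨new, h1, h2, h3, ?_⟩
  unfold bfs
  rw [hadd, h4, List.append_assoc]

lemma dfs_spec (land : List (List Int)) (seen : PySem.Set (Int × Int)) (r c : Int)
    (hv : (r, c) ∉ seen) :
    ∃ new : List (Int × Int), ∃ cells' : List Int,
      new.Nodup ∧ (∀ p ∈ new, p ∉ seen ++ [(r, c)] ∧ pvOil land p) ∧
      (∀ w, (w ∈ seen ++ [(r, c)] ∨ w ∈ new) ↔
        (w ∈ seen ++ [(r, c)] ∨
          pvRch land {p | p ∈ seen ++ [(r, c)]} {p | p ∈ [(r, c)]} w)) ∧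
      dfsLoop land (land.length * (land.headD []).length + 1)
        (PySem.Set.add seen (r, c)) [(r, c)] [] = (seen ++ [(r, c)] ++ new, cells') ∧
      List.Perm cells' (c :: new.map Prod.snd) := by
  have hadd : PySem.Set.add seen (r, c) = seen ++ [(r, c)] := PySem.Set.add_of_not_mem hv
  have hq : ∀ p ∈ [(r, c)], p ∈ seen ++ [(r, c)] := by simp
  have hfuel : pvUnvis land (seen ++ [(r, c)]) + [(r, c)].length ≤
      land.length * (land.headD []).length + 1 := by
    have := pvUnvis_le land (seen ++ [(r, c)])
    simp only [List.length_singleton]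
    omega
  obtain ⟨new, cells', h1, h2, h3, h4, h5⟩ :=
    dfsLoop_spec land (land.length * (land.headD []).length + 1) (seen ++ [(r, c)])
      [(r, c)] [] hq hfuel
  refine ⟨new, cells', h1, h2, h3, ?_, ?_⟩
  · rw [hadd, h4, List.append_assoc]
  · refine h5.trans ?_
    simp

-- ---- values determined by the visited delta, independent of discovery order ----
lemma min?_getD_of_perm (l t : List Int) (x : Int) (h : List.Perm l (x :: t)) :
    (PySem.List.min? l (fun v => v)).getD 0 = t.foldl min x := by
  obtain ⟨m, hm⟩ : ∃ m, PySem.List.min? l (fun v => v) = some m := by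
    cases hl : PySem.List.min? l (fun v => v) with
    | none =>
      rw [PySem.List.min?_eq_none_iff] at hl
      subst hl
      have := h.length_eq
      simp at this
    | some m => exact ⟨m, rfl⟩
  rw [hm]
  simp only [Option.getD_some]
  have hmem : m ∈ x :: t := h.mem_iff.mp (PySem.List.min?_mem hm)
  have hmin : ∀ y ∈ x :: t, m ≤ y := fun y hy =>
    PySem.List.min?_isMin hm y (h.mem_iff.mpr hy)
  have h1 := PySem.List.foldl_min_le t x
  have h2 := PySem.List.foldl_min_mem t x
  apply le_antisymm
  · rcases h2 with h2 | h2
    · rw [h2]; exact hmin x List.mem_cons_self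
    · exact hmin _ (List.mem_cons_of_mem _ h2)
  · rcases List.mem_cons.mp hmem with rfl | hmt
    · exact h1.1
    · exact h1.2 m hmt

lemma max?_getD_of_perm (l t : List Int) (x : Int) (h : List.Perm l (x :: t)) :
    (PySem.List.max? l (fun v => v)).getD 0 = t.foldl max x := by
  obtain ⟨m, hm⟩ : ∃ m, PySem.List.max? l (fun v => v) = some m := by
    cases hl : PySem.List.max? l (fun v => v) with
    | none =>
      rw [PySem.List.max?_eq_none_iff] at hl
      subst hl
      have := h.length_eq
      simp at this
    | some m => exact ⟨m, rfl⟩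
  rw [hm]
  simp only [Option.getD_some]
  have hmem : m ∈ x :: t := h.mem_iff.mp (PySem.List.max?_mem hm)
  have hmax : ∀ y ∈ x :: t, y ≤ m := fun y hy =>
    PySem.List.max?_isMax hm y (h.mem_iff.mpr hy)
  have h1 := PySem.List.le_foldl_max t x
  have h2 := PySem.List.foldl_max_mem t x
  apply le_antisymm
  · rcases List.mem_cons.mp hmem with rfl | hmt
    · exact h1.1
    · exact h1.2 m hmt
  · rcases h2 with h2 | h2
    · rw [h2]; exact hmax x List.mem_cons_self
    · exact hmax _ (List.mem_cons_of_mem _ h2)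

-- ---- dp range-add (A) and difference array + prefix sums (B) ----
lemma updRange (cnt : Int) : ∀ (n : Nat) (a b : Int), (b - a).toNat = n →
    ∀ (d : Int → Int) (j : Int),
    ((PySem.List.pyRange a b 1).foldl
        (fun d i => fun k => if k = i then d k + cnt else d k) d) j
      = d j + (if a ≤ j ∧ j < b then cnt else 0) := by
  intro n
  induction n with
  | zero =>
    intro a b h d j
    have hba : b ≤ a := by omega
    rw [PySem.List.pyRange_one_eq_nil hba]
    simp only [List.foldl_nil]
    have : ¬ (a ≤ j ∧ j < b) := by omega
    rw [if_neg this, add_zero]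
  | succ n ih =>
    intro a b h d j
    have hab : a < b := by omega
    rw [PySem.List.pyRange_one_cons hab, List.foldl_cons]
    rw [ih (a + 1) b (by omega) _ j]
    by_cases hj : j = a
    · subst hj
      have h1 : ¬ (j + 1 ≤ j ∧ j < b) := by omega
      have h2 : j ≤ j ∧ j < b := by omega
      rw [if_pos rfl, if_neg h1, if_pos h2, add_zero]
    · rw [if_neg hj]
      split_ifs with h1 h2 <;> first | rfl | omega

lemma sum_map_update (l : List Int) (hl : l.Nodup) (f g : Int → Int) (k v : Int)
    (hg : ∀ j, g j = if j = k then f j + v else f j) :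
    (l.map g).sum = (l.map f).sum + (if k ∈ l then v else 0) := by
  induction l with
  | nil => simp
  | cons a t ih =>
    have hat : a ∉ t := (List.nodup_cons.mp hl).1
    have hnd : t.Nodup := (List.nodup_cons.mp hl).2
    simp only [List.map_cons, List.sum_cons, ih hnd, hg a, List.mem_cons]
    by_cases hak : a = k
    · subst hak
      have hkt : a ∉ t := hat
      simp [hkt]
      ring
    · simp only [if_neg hak]
      by_cases hkt : k ∈ t
      · simp [hkt, Ne.symm hak]
        ring
      · simp [hkt]
        omega

def spanSum (spans : List (Int × Int × Int)) (i : Int) : Int :=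
  (spans.map (fun sp => if sp.2.1 ≤ i ∧ i ≤ sp.2.2 then sp.1 else 0)).sum

lemma diff_prefix (C : Int) :
    ∀ (spans : List (Int × Int × Int)) (d : Int → Int) (i : Int), 0 ≤ i → i < C →
    (∀ sp ∈ spans, 0 ≤ sp.2.1 ∧ sp.2.1 ≤ sp.2.2 ∧ sp.2.2 < C) →
    ((PySem.List.pyRange 0 (i + 1) 1).map (spans.foldl diffStep d)).sum
      = ((PySem.List.pyRange 0 (i + 1) 1).map d).sum + spanSum spans i := by
  intro spans
  induction spans with
  | nil => intro d i _ _ _; simp [spanSum]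
  | cons sp t ih =>
    intro d i hi0 hiC hb
    have hbsp := hb sp List.mem_cons_self
    have hbt : ∀ x ∈ t, 0 ≤ x.2.1 ∧ x.2.1 ≤ x.2.2 ∧ x.2.2 < C :=
      fun x hx => hb x (List.mem_cons_of_mem _ hx)
    rw [List.foldl_cons, ih (diffStep d sp) i hi0 hiC hbt]
    have hnd : (PySem.List.pyRange 0 (i + 1) 1).Nodup := PySem.List.nodup_pyRange_one _ _
    have hs1 : ((PySem.List.pyRange 0 (i + 1) 1).map (diffStep d sp)).sum
        = ((PySem.List.pyRange 0 (i + 1) 1).map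
            (fun j => if j = sp.2.1 then d j + sp.1 else d j)).sum
          + (if sp.2.2 + 1 ∈ PySem.List.pyRange 0 (i + 1) 1 then -sp.1 else 0) := by
      apply sum_map_update _ hnd _ _ _ (-sp.1)
      intro j
      simp only [diffStep]
      by_cases hj : j = sp.2.2 + 1 <;> (simp [hj]; try ring)
    have hs2 : ((PySem.List.pyRange 0 (i + 1) 1).map
          (fun j => if j = sp.2.1 then d j + sp.1 else d j)).sum
        = ((PySem.List.pyRange 0 (i + 1) 1).map d).sum
          + (if sp.2.1 ∈ PySem.List.pyRange 0 (i + 1) 1 then sp.1 else 0) := by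
      apply sum_map_update _ hnd _ _ _ sp.1
      intro j
      rfl
    rw [hs1, hs2]
    have hm1 : sp.2.1 ∈ PySem.List.pyRange 0 (i + 1) 1 ↔ 0 ≤ sp.2.1 ∧ sp.2.1 < i + 1 :=
      PySem.List.mem_pyRange_one
    have hm2 : sp.2.2 + 1 ∈ PySem.List.pyRange 0 (i + 1) 1 ↔
        0 ≤ sp.2.2 + 1 ∧ sp.2.2 + 1 < i + 1 := PySem.List.mem_pyRange_one
    have hspan : spanSum (sp :: t) i
        = (if sp.2.1 ≤ i ∧ i ≤ sp.2.2 then sp.1 else 0) + spanSum t i := by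
      simp [spanSum]
    rw [hspan]
    split_ifs with h1 h2 h3 h4 h5 h6 h7 <;> (rw [hm1] at *; rw [hm2] at *; omega)

lemma prefix_fold (diff : Int → Int) : ∀ (n : Nat) (s0 : Int) (l0 : List Int),
    (PySem.List.pyRange 0 (n : Int) 1).foldl
        (fun (acc : Int × List Int) i => (acc.1 + diff i, acc.2 ++ [acc.1 + diff i])) (s0, l0)
      = (s0 + ((PySem.List.pyRange 0 (n : Int) 1).map diff).sum,
         l0 ++ (PySem.List.pyRange 0 (n : Int) 1).map
           (fun i => s0 + ((PySem.List.pyRange 0 (i + 1) 1).map diff).sum)) := by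
  intro n
  induction n with
  | zero =>
    intro s0 l0
    rw [show ((0 : Nat) : Int) = 0 from rfl, PySem.List.pyRange_one_eq_nil le_rfl]
    simp
  | succ n ih =>
    intro s0 l0
    have hcast : ((n + 1 : Nat) : Int) = (n : Int) + 1 := by push_cast; ring
    have hsplit : PySem.List.pyRange 0 ((n : Int) + 1) 1
        = PySem.List.pyRange 0 (n : Int) 1 ++ [(n : Int)] :=
      PySem.List.pyRange_one_succ_right (Int.natCast_nonneg n)
    rw [hcast, hsplit, List.foldl_append, ih s0 l0]
    refine Prod.ext ?_ ?_
    · simp [List.sum_append]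
      ring
    · simp only [List.foldl_cons, List.foldl_nil, List.map_append, List.map_cons, List.map_nil,
        List.append_assoc]
      congr 1
      rw [hsplit]
      simp [List.sum_append]
      ring

-- ---- generic two-fold relation lemma ----
lemma foldl_rel {α β γ : Type} (P : α → β → Prop) (f : α → γ → α) (g : β → γ → β) :
    ∀ (l : List γ) (a : α) (b : β), P a b →
      (∀ x ∈ l, ∀ a b, P a b → P (f a x) (g b x)) →
      P (l.foldl f a) (l.foldl g b) := by
  intro l
  induction l with
  | nil => intro a b h _; exact h
  | cons x t ih =>
    intro a b h hstep
    exact ih (f a x) (g b x) (hstep x List.mem_cons_self a b h)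
      (fun z hz => hstep z (List.mem_cons_of_mem _ hz))

-- ---- structured forms of the two outer loops ----
def gA (land : List (List Int)) (r : Int)
    (st : PySem.Set (Int × Int) × (Int → Int)) (c : Int) :
    PySem.Set (Int × Int) × (Int → Int) :=
  if pvAt land r c = 1 ∧ (r, c) ∉ st.1 then
    ((bfs land st.1 r c).1,
      (PySem.List.pyRange (bfs land st.1 r c).2.2.2 ((bfs land st.1 r c).2.2.1 + 1) 1).foldl
        (fun d i => fun j => if j = i then d j + (bfs land st.1 r c).2.1 else d j) st.2)
  else st

def outA (land : List (List Int)) : PySem.Set (Int × Int) × (Int → Int) :=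
  (PySem.List.pyRange 0 (land.length : Int) 1).foldl
    (fun st r =>
      (PySem.List.pyRange 0 ((land.headD []).length : Int) 1).foldl (gA land r) st)
    ([], fun _ => 0)

lemma solution_form (land : List (List Int)) :
    solution land = (PySem.List.max?
      ((PySem.List.pyRange 0 ((land.headD []).length : Int) 1).map (outA land).2)
      (fun x => x)).getD 0 := rfl

def gB (land : List (List Int)) (r : Int)
    (st : PySem.Set (Int × Int) × List (Int × Int × Int)) (c : Int) :
    PySem.Set (Int × Int) × List (Int × Int × Int) :=
  if pvAtB land r c = 1 ∧ (r, c) ∉ st.1 then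
    ((dfsLoop land (land.length * (land.headD []).length + 1)
        (PySem.Set.add st.1 (r, c)) [(r, c)] []).1,
      st.2 ++ [(((dfsLoop land (land.length * (land.headD []).length + 1)
          (PySem.Set.add st.1 (r, c)) [(r, c)] []).2.length : Int),
        (PySem.List.min? (dfsLoop land (land.length * (land.headD []).length + 1)
          (PySem.Set.add st.1 (r, c)) [(r, c)] []).2 (fun v => v)).getD 0,
        (PySem.List.max? (dfsLoop land (land.length * (land.headD []).length + 1)
          (PySem.Set.add st.1 (r, c)) [(r, c)] []).2 (fun v => v)).getD 0)])
  else st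

def outB (land : List (List Int)) : PySem.Set (Int × Int) × List (Int × Int × Int) :=
  (PySem.List.pyRange 0 (land.length : Int) 1).foldl
    (fun st r =>
      (PySem.List.pyRange 0 ((land.headD []).length : Int) 1).foldl (gB land r) st)
    ([], [])

lemma solution_alt_form (land : List (List Int)) :
    solution_alt land = (PySem.List.max?
      (((PySem.List.pyRange 0 ((land.headD []).length : Int) 1).foldl
        (fun (acc : Int × List Int) i =>
          (acc.1 + (outB land).2.foldl diffStep (fun _ => (0 : Int)) i,
           acc.2 ++ [acc.1 + (outB land).2.foldl diffStep (fun _ => (0 : Int)) i])) (0, [])).2)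
      (fun x => x)).getD 0 := rfl

-- ---- the joint invariant of the two outer loops ----
def pvInv (land : List (List Int))
    (A : PySem.Set (Int × Int) × (Int → Int))
    (B : PySem.Set (Int × Int) × List (Int × Int × Int)) : Prop :=
  (∀ p, p ∈ A.1 ↔ p ∈ B.1) ∧ (∀ i, A.2 i = spanSum B.2 i) ∧
    (∀ sp ∈ B.2, 0 ≤ sp.2.1 ∧ sp.2.1 ≤ sp.2.2 ∧ sp.2.2 < ((land.headD []).length : Int))

lemma step_preserve (land : List (List Int)) (r c : Int)
    (hc : 0 ≤ c ∧ c < ((land.headD []).length : Int))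
    (A : PySem.Set (Int × Int) × (Int → Int))
    (B : PySem.Set (Int × Int) × List (Int × Int × Int))
    (h : pvInv land A B) : pvInv land (gA land r A c) (gB land r B c) := by
  obtain ⟨hmem, hdp, hb⟩ := h
  by_cases hg : pvAt land r c = 1 ∧ (r, c) ∉ A.1
  case neg =>
    have hgB : ¬ (pvAt land r c = 1 ∧ (r, c) ∉ B.1) := fun hgB =>
      hg ⟨hgB.1, fun hA => hgB.2 ((hmem _).mp hA)⟩
    unfold gA gB
    simp only [pvAtB_eq]
    rw [if_neg hg, if_neg hgB]
    exact ⟨hmem, hdp, hb⟩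
  case pos =>
    have hvA : (r, c) ∉ A.1 := hg.2
    have hvB : (r, c) ∉ B.1 := fun hB => hvA ((hmem _).mpr hB)
    obtain ⟨newA, hndA, hpropsA, hiffA, heqA⟩ := bfs_spec land A.1 r c hvA
    obtain ⟨newB, cells', hndB, hpropsB, hiffB, heqB, hpermB⟩ := dfs_spec land B.1 r c hvB
    have hset : ({p | p ∈ A.1 ++ [(r, c)]} : Set (Int × Int)) = {p | p ∈ B.1 ++ [(r, c)]} := by
      ext p
      simp [List.mem_append, hmem p]
    have hmemAB : ∀ p, p ∈ newA ↔ p ∈ newB := by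
      intro p
      constructor
      · intro hp
        have hnin : p ∉ A.1 ++ [(r, c)] := (hpropsA p hp).1
        have hninB : p ∉ B.1 ++ [(r, c)] := by
          intro hB
          apply hnin
          rcases List.mem_append.mp hB with hh | hh
          · exact List.mem_append.mpr (Or.inl ((hmem p).mpr hh))
          · exact List.mem_append.mpr (Or.inr hh)
        have hrch : pvRch land {q | q ∈ A.1 ++ [(r, c)]} {q | q ∈ [(r, c)]} p := by
          rcases (hiffA p).mp (Or.inr hp) with hh | hh
          · exact absurd hh hnin
          · exact hh
        rw [hset] at hrch
        rcases (hiffB p).mpr (Or.inr hrch) with hh | hh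
        · exact absurd hh hninB
        · exact hh
      · intro hp
        have hnin : p ∉ B.1 ++ [(r, c)] := (hpropsB p hp).1
        have hninA : p ∉ A.1 ++ [(r, c)] := by
          intro hA
          apply hnin
          rcases List.mem_append.mp hA with hh | hh
          · exact List.mem_append.mpr (Or.inl ((hmem p).mp hh))
          · exact List.mem_append.mpr (Or.inr hh)
        have hrch : pvRch land {q | q ∈ B.1 ++ [(r, c)]} {q | q ∈ [(r, c)]} p := by
          rcases (hiffB p).mp (Or.inr hp) with hh | hh
          · exact absurd hh hnin
          · exact hh
        rw [← hset] at hrch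
        rcases (hiffA p).mpr (Or.inr hrch) with hh | hh
        · exact absurd hh hninA
        · exact hh
    have hpermAB : List.Perm newA newB := (List.perm_ext_iff_of_nodup hndA hndB).mpr hmemAB
    have hgB : pvAt land r c = 1 ∧ (r, c) ∉ B.1 := ⟨hg.1, hvB⟩
    have hlen : (cells'.length : Int) = 1 + (newA.length : Int) := by
      have h1 := hpermB.length_eq
      have h2 := hpermAB.length_eq
      simp only [List.length_cons, List.length_map] at h1
      omega
    have hlo : (PySem.List.min? cells' (fun v => v)).getD 0 = (newA.map Prod.snd).foldl min c := by
      rw [min?_getD_of_perm cells' (newB.map Prod.snd) c hpermB]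
      exact ((hpermAB.map Prod.snd).foldl_eq _).symm
    have hhi : (PySem.List.max? cells' (fun v => v)).getD 0 = (newA.map Prod.snd).foldl max c := by
      rw [max?_getD_of_perm cells' (newB.map Prod.snd) c hpermB]
      exact ((hpermAB.map Prod.snd).foldl_eq _).symm
    have hcolA : ∀ v ∈ newA.map Prod.snd, 0 ≤ v ∧ v < ((land.headD []).length : Int) := by
      intro v hv
      obtain ⟨p, hp, rfl⟩ := List.mem_map.mp hv
      have hoil := (hpropsA p hp).2.1
      exact ⟨hoil.2.2.1, hoil.2.2.2⟩
    unfold gA gB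
    simp only [pvAtB_eq]
    rw [if_pos hg, if_pos hgB, heqA, heqB]
    refine ⟨?_, ?_, ?_⟩
    · intro p
      simp only [List.mem_append, hmem p, hmemAB p]
    · intro i
      show ((PySem.List.pyRange ((newA.map Prod.snd).foldl min c)
          ((newA.map Prod.snd).foldl max c + 1) 1).foldl
          (fun d i => fun j => if j = i then d j + (1 + (newA.length : Int)) else d j) A.2) i
        = spanSum (B.2 ++ [((cells'.length : Int),
            (PySem.List.min? cells' (fun v => v)).getD 0,
            (PySem.List.max? cells' (fun v => v)).getD 0)]) i
      rw [updRange (1 + (newA.length : Int))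
        (((newA.map Prod.snd).foldl max c + 1 - (newA.map Prod.snd).foldl min c).toNat)
        _ _ rfl A.2 i]
      have hspan : spanSum (B.2 ++ [((cells'.length : Int),
          (PySem.List.min? cells' (fun v => v)).getD 0,
          (PySem.List.max? cells' (fun v => v)).getD 0)]) i
          = spanSum B.2 i + (if (PySem.List.min? cells' (fun v => v)).getD 0 ≤ i ∧
              i ≤ (PySem.List.max? cells' (fun v => v)).getD 0
            then (cells'.length : Int) else 0) := by
        simp [spanSum]
      rw [hspan, hdp i, hlo, hhi, hlen]
      split_ifs with h1 h2 <;> omega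
    · intro sp hsp
      rcases List.mem_append.mp hsp with hh | hh
      · exact hb sp hh
      · have hsp' : sp = ((cells'.length : Int),
            (PySem.List.min? cells' (fun v => v)).getD 0,
            (PySem.List.max? cells' (fun v => v)).getD 0) := by
          simpa using hh
        subst hsp'
        simp only [hlo, hhi]
        have h1 := PySem.List.foldl_min_le (newA.map Prod.snd) c
        have h2 := PySem.List.le_foldl_max (newA.map Prod.snd) c
        have h3 := PySem.List.foldl_min_mem (newA.map Prod.snd) c
        have h4 := PySem.List.foldl_max_mem (newA.map Prod.snd) c
        refine ⟨?_, ?_, ?_⟩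
        · rcases h3 with h3 | h3
          · omega
          · exact (hcolA _ h3).1
        · exact le_trans h1.1 h2.1
        · rcases h4 with h4 | h4
          · omega
          · exact (hcolA _ h4).2

lemma sum_map_zero (l : List Int) : (l.map (fun _ => (0 : Int))).sum = 0 := by
  induction l with
  | nil => rfl
  | cons a t ih => simpa using ih

lemma main_eq (land : List (List Int)) : solution land = solution_alt land := by
  rw [solution_form, solution_alt_form]
  have hInv : pvInv land (outA land) (outB land) := by
    unfold outA outB
    apply foldl_rel (pvInv land)
    · refine ⟨by simp, by simp [spanSum], by simp⟩
    · intro r _ A B hP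
      apply foldl_rel (pvInv land)
      · exact hP
      · intro c hcmem A' B' hP'
        have hc := PySem.List.mem_pyRange_one.mp hcmem
        exact step_preserve land r c hc A' B' hP'
  obtain ⟨hmem, hdp, hbounds⟩ := hInv
  rw [prefix_fold ((outB land).2.foldl diffStep (fun _ => (0 : Int)))
    ((land.headD []).length) 0 []]
  simp only [List.nil_append]
  have hl : (PySem.List.pyRange 0 (((land.headD []).length : Nat) : Int) 1).map
      (fun i => 0 + ((PySem.List.pyRange 0 (i + 1) 1).map
        ((outB land).2.foldl diffStep (fun _ => (0 : Int)))).sum)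
      = (PySem.List.pyRange 0 (((land.headD []).length : Nat) : Int) 1).map (outA land).2 := by
    apply List.map_congr_left
    intro i hi
    have hi' := PySem.List.mem_pyRange_one.mp hi
    rw [diff_prefix ((land.headD []).length : Int) (outB land).2 (fun _ => (0 : Int))
      i hi'.1 hi'.2 hbounds]
    rw [sum_map_zero, hdp i]
    ring
  rw [hl]

-- ===== VERDICT (by name: the statement is the Claim_ definition above) =====
theorem solution_spec : Claim_equal_solution := by
  unfold Claim_equal_solution
  intro land _hdom _hpre
  unfold Spec_solution
  exact main_eq land
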